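-- pv_equiv track=rewrite | github.com/hannahmahmoud/whileLoopComplier | leftMostDerivation.py | preprocess_numbers
-- ===== SOURCE A (Python) =====
-- def preprocess_numbers(tokens):
--     processed = []
--     i = 0
--     while i < len(tokens):
--         if i < len(tokens) and tokens[i] in '0123456789.':
--             num = tokens[i]
--             i += 1
--             while i < len(tokens) and tokens[i] in '0123456789':
--                 num += tokens[i]
--                 i += 1
--             if i < len(tokens) and tokens[i] == '.':
--                 num += '.'
--                 i += 1
--                 while i < len(tokens) and tokens[i] in '0123456789':
--                     num += tokens[i]
--                     i += 1
--                 processed.append(num)  # Keep float literal as single token (e.g., .5, 123.456)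
--             else:
--                 processed.append(num)  # Integer or partial float starting with .
--         else:
--             processed.append(tokens[i])
--             i += 1
--     return processed
-- ===== SOURCE B (Python) =====
-- def preprocess_numbers(tokens):
--     # Flat one-pass state machine: cur = pending number literal (or None),
--     # seen_dot distinguishes before/after the optional '.'.
--     out = []
--     cur = None
--     seen_dot = False
--
--     def start(t):
--         nonlocal cur, seen_dot
--         if t in '0123456789.':
--             cur = t
--             seen_dot = False
--         else:
--             out.append(t)
--
--     for t in tokens:
--         if cur is None:
--             start(t)
--         elif not seen_dot and t in '0123456789':
--             cur += t
--         elif not seen_dot and t == '.':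
--             cur += '.'
--             seen_dot = True
--         elif seen_dot and t in '0123456789':
--             cur += t
--         else:
--             out.append(cur)
--             cur = None
--             start(t)
--     if cur is not None:
--         out.append(cur)
--     return out
-- ===== Notes on version B (the rewrite author's own statement) =====
-- stated objective: alternative
-- what changed: Replaces A's index-driven outer while with two nested digit-consuming inner loops by a single flat for-loop state machine carrying the pending literal and a before/after-dot flag, flushing and restarting on boundary tokens.
import Mathlib
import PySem

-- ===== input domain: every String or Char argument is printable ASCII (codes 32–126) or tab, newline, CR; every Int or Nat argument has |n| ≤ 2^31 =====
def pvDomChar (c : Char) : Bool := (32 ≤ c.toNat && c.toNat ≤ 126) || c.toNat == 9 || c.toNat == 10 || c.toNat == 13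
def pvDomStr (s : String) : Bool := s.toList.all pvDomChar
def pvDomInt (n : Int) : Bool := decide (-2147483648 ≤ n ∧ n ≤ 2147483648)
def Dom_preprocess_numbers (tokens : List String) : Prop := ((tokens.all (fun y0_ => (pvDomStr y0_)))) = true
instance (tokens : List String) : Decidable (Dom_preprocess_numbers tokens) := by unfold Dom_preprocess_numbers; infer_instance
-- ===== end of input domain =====

-- ===== PORT A =====
-- Header: B replaces A's index-based scan with nested inner loops by a flat
-- one-pass state machine (pending literal + before/after-dot flag); alternative
-- decomposition, same return value (objective: alternative).

-- A's inner 'while tokens[i] in "0123456789"' loops: consume digit-substring tokens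
def aConsume (num : String) : List String → String × List String
  | [] => (num, [])
  | t :: rest =>
    if PySem.Str.isIn t "0123456789" then aConsume (num ++ t) rest
    else (num, t :: rest)

theorem aConsume_len (num : String) (ts : List String) :
    (aConsume num ts).2.length ≤ ts.length := by
  induction ts generalizing num with
  | nil => simp [aConsume]
  | cons t rest ih =>
    simp only [aConsume]
    split
    · exact le_trans (ih _) (by simp)
    · simp

-- A's outer while loop, on the suffix of tokens from index i;
-- p.2 ≠ [] ∧ p.2.headI = "." is 'i < len(tokens) and tokens[i] == "."'
def aLoop : List String → List String
  | [] => []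
  | t :: rest =>
    if PySem.Str.isIn t "0123456789." then
      let p := aConsume t rest
      if h : p.2 ≠ [] ∧ p.2.headI = "." then
        let q := aConsume (p.1 ++ ".") p.2.tail
        q.1 :: aLoop q.2
      else p.1 :: aLoop p.2
    else t :: aLoop rest
termination_by ts => ts.length
decreasing_by
  · have hc := aConsume_len t rest
    have hc2 := aConsume_len ((aConsume t rest).1 ++ ".") (aConsume t rest).2.tail
    have hne := h.1
    have : (aConsume t rest).2.tail.length < (aConsume t rest).2.length := by
      cases hh : (aConsume t rest).2 with
      | nil => exact absurd hh hne
      | cons a l => simp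
    simp only [List.length_cons]
    omega
  · have hc := aConsume_len t rest
    simp only [List.length_cons]
    omega
  · simp

def preprocess_numbers (tokens : List String) : List String := aLoop tokens

-- ===== PORT B =====
-- state: (out so far, pending literal cur, seen_dot)
def bStart (t : String) (out : List String) (sd : Bool) :
    List String × Option String × Bool :=
  if PySem.Str.isIn t "0123456789." then (out, some t, false)
  else (out ++ [t], none, sd)

def bStep (st : List String × Option String × Bool) (t : String) :
    List String × Option String × Bool :=
  match st with
  | (out, none, sd) => bStart t out sd
  | (out, some cur, sd) =>
    if !sd && PySem.Str.isIn t "0123456789" then (out, some (cur ++ t), sd)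
    else if !sd && t = "." then (out, some (cur ++ "."), true)
    else if sd && PySem.Str.isIn t "0123456789" then (out, some (cur ++ t), sd)
    else bStart t (out ++ [cur]) sd

def bFinal (st : List String × Option String × Bool) : List String :=
  match st with
  | (out, some c, _) => out ++ [c]
  | (out, none, _) => out

def preprocess_numbers_alt (tokens : List String) : List String :=
  bFinal (tokens.foldl bStep ([], none, false))

-- ===== PRECONDITION & SPEC =====
def Spec_preprocess_numbers (tokens : List String) (out : List String) : Prop := out = preprocess_numbers_alt tokens
instance (tokens : List String) (out : List String) : Decidable (Spec_preprocess_numbers tokens out) := by unfold Spec_preprocess_numbers; infer_instance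

-- ===== CLAIM (what is proved, stated in full; the proofs are below) =====
def Claim_equal_preprocess_numbers : Prop := ∀ (tokens : List String), Dom_preprocess_numbers tokens → Spec_preprocess_numbers tokens (preprocess_numbers tokens)

-- ===== LEMMAS AND PROOFS =====

theorem aLoop_nil : aLoop [] = [] := by rw [aLoop]

theorem aLoop_cons (t : String) (rest : List String) :
    aLoop (t :: rest) =
      if PySem.Str.isIn t "0123456789." then
        let p := aConsume t rest
        if p.2 ≠ [] ∧ p.2.headI = "." then
          let q := aConsume (p.1 ++ ".") p.2.tail
          q.1 :: aLoop q.2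
        else p.1 :: aLoop p.2
      else t :: aLoop rest := by
  conv_lhs => rw [aLoop]
  rfl

theorem aLoop_cons_nostart (t : String) (rest : List String)
    (hstart : ¬ PySem.Str.isIn t "0123456789." = true) :
    aLoop (t :: rest) = t :: aLoop rest := by
  simp at hstart
  rw [aLoop_cons]; simp [hstart]

theorem aLoop_cons_int (t : String) (rest : List String) (num : String) (rest1 : List String)
    (hstart : PySem.Str.isIn t "0123456789." = true)
    (h1 : aConsume t rest = (num, rest1))
    (hnd : rest1 = [] ∨ rest1.headI ≠ ".") :
    aLoop (t :: rest) = num :: aLoop rest1 := by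
  simp at hstart
  rw [aLoop_cons]
  rcases hnd with h | h <;> simp [hstart, h1, h]

theorem aLoop_cons_float (t : String) (rest : List String) (num : String)
    (d : String) (rest2 : List String) (num2 : String) (rest3 : List String)
    (hstart : PySem.Str.isIn t "0123456789." = true)
    (h1 : aConsume t rest = (num, d :: rest2)) (hd : d = ".")
    (h2 : aConsume (num ++ ".") rest2 = (num2, rest3)) :
    aLoop (t :: rest) = num2 :: aLoop rest3 := by
  simp at hstart
  rw [aLoop_cons]
  simp [hstart, h1, hd, h2]

-- folding B from a pre-dot pending state runs A's first inner loop
theorem fold_preDigits (ts : List String) (out : List String) (num : String) :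
    ts.foldl bStep (out, some num, false) =
      match aConsume num ts with
      | (num1, []) => (out, some num1, false)
      | (num1, d :: rest2) =>
        if d = "." then rest2.foldl bStep (out, some (num1 ++ "."), true)
        else (d :: rest2).foldl bStep (out ++ [num1], none, false) := by
  induction ts generalizing num with
  | nil => simp [aConsume]
  | cons t rest ih =>
    by_cases hd : PySem.Str.isIn t "0123456789" = true
    · simp only [List.foldl_cons, bStep, hd, aConsume, Bool.not_false, Bool.true_and, if_true]
      exact ih (num ++ t)
    · by_cases hdot : t = "."
      · subst hdot
        simp only [List.foldl_cons, bStep, aConsume]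
        rw [show PySem.Str.isIn "." "0123456789" = false from by decide]
        simp
      · simp only [List.foldl_cons, bStep, aConsume]
        simp at hd
        simp [hd, hdot, bStart]

-- folding B from a post-dot pending state runs A's second inner loop
theorem fold_postDigits (ts : List String) (out : List String) (num : String) :
    ts.foldl bStep (out, some num, true) =
      match aConsume num ts with
      | (num1, []) => (out, some num1, true)
      | (num1, d :: rest2) => (d :: rest2).foldl bStep (out ++ [num1], none, true) := by
  induction ts generalizing num with
  | nil => simp [aConsume]
  | cons t rest ih =>
    by_cases hd : PySem.Str.isIn t "0123456789" = true
    · simp only [List.foldl_cons, bStep, hd, aConsume, Bool.not_true, Bool.false_and,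
        Bool.true_and, if_true]
      exact ih (num ++ t)
    · simp only [List.foldl_cons, bStep, aConsume]
      simp at hd
      simp [hd, bStart]

theorem main_lemma : ∀ (n : Nat) (ts : List String), ts.length ≤ n →
    ∀ (out : List String) (sd : Bool),
      bFinal (ts.foldl bStep (out, none, sd)) = out ++ aLoop ts := by
  intro n
  induction n with
  | zero =>
    intro ts hts out sd
    have : ts = [] := List.length_eq_zero_iff.mp (Nat.le_zero.mp hts)
    subst this
    simp [bFinal, aLoop_nil]
  | succ n ih =>
    intro ts hts out sd
    cases ts with
    | nil => simp [bFinal, aLoop_nil]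
    | cons t rest =>
      have hrest : rest.length ≤ n := by simpa using hts
      by_cases hstart : PySem.Str.isIn t "0123456789." = true
      · simp only [List.foldl_cons, bStep, bStart, if_pos hstart]
        rw [fold_preDigits rest out t]
        have hc1 := aConsume_len t rest
        rcases h1 : aConsume t rest with ⟨num1, rest1⟩
        rw [h1] at hc1
        simp only at hc1
        cases rest1 with
        | nil =>
          rw [aLoop_cons_int t rest num1 [] hstart h1 (Or.inl rfl), aLoop_nil]
          simp [bFinal]
        | cons d rest2 =>
          by_cases hdot : d = "."
          · simp only [if_pos hdot]
            rw [fold_postDigits rest2 out (num1 ++ ".")]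
            have hc2 := aConsume_len (num1 ++ ".") rest2
            rcases h2 : aConsume (num1 ++ ".") rest2 with ⟨num2, rest3⟩
            rw [h2] at hc2
            simp only at hc2
            rw [aLoop_cons_float t rest num1 d rest2 num2 rest3 hstart h1 hdot h2]
            cases rest3 with
            | nil =>
              rw [aLoop_nil]
              simp [bFinal]
            | cons e rest4 =>
              have hlen : (e :: rest4).length ≤ n := by
                simp at hc1 hc2 ⊢; omega
              rw [ih _ hlen]
              simp
          · simp only [if_neg hdot]
            have hlen : (d :: rest2).length ≤ n := by
              simp at hc1 ⊢; omega
            rw [ih _ hlen]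
            rw [aLoop_cons_int t rest num1 (d :: rest2) hstart h1 (Or.inr (by simpa using hdot))]
            simp
      · simp only [List.foldl_cons, bStep, bStart, if_neg hstart]
        rw [ih rest hrest]
        rw [aLoop_cons_nostart t rest hstart]
        simp

-- ===== VERDICT (by name: the statement is the Claim_ definition above) =====
theorem preprocess_numbers_spec : Claim_equal_preprocess_numbers := by
  intro tokens _
  unfold Spec_preprocess_numbers preprocess_numbers preprocess_numbers_alt
  exact (main_lemma tokens.length tokens le_rfl [] false).symm
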